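-- pv_equiv track=rewrite | github.com/can0kilic/MA_Projekt | boris/parsefail2_1.py | parse_raw_name
-- ===== SOURCE A (Python) =====
-- remove_strings = [
--     'dr','med', 'prof', 'vet',
--     'm.a', 'phil', 'pd', 'msc',
--     'phd', 'em', 'lic', 'von',
--     'mlaw', 'nat', 'iur', 'sc',
--     'dent','(†)','decvdi','advocate',
--     '(verh. kaboğan)','blaw',
--     'rechtsanwalt','rechtsanwältin',
--     'und', 'notarin','fürsprecher',
--     'projektverantwortlicher', 'forschungsstelle','gewalt',
--     'bei', 'sportveranstaltungen',  'sozialanthropologie', 'senior',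
--     'researcher', 'lawyer','pediatrician','mph','hr-', 'fachfrau',
--     'physics','ecvp'
--     ]
--
-- def parse_raw_name(raw_name):
--     raw_name = raw_name.replace(',', '')
--     raw_name = raw_name.replace('(', '')
--     raw_name = raw_name.replace(')', '')
--
--     splitted_list = raw_name.split()
--     splitted_list = [s for s in splitted_list if '.' not in s]
--     splitted_list = [s.lower() for s in splitted_list]
--     splitted_list = [s for s in splitted_list if len(s) > 2]
--     splitted_list = [s for s in splitted_list if s not in remove_strings]
--
--     first_name = splitted_list[0] if splitted_list else ''
--     last_name = splitted_list[-1] if splitted_list else ''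
--
--     return first_name, last_name
-- ===== SOURCE B (Python) =====
-- remove_strings = [
--     'dr','med', 'prof', 'vet',
--     'm.a', 'phil', 'pd', 'msc',
--     'phd', 'em', 'lic', 'von',
--     'mlaw', 'nat', 'iur', 'sc',
--     'dent','(†)','decvdi','advocate',
--     '(verh. kaboğan)','blaw',
--     'rechtsanwalt','rechtsanwältin',
--     'und', 'notarin','fürsprecher',
--     'projektverantwortlicher', 'forschungsstelle','gewalt',
--     'bei', 'sportveranstaltungen',  'sozialanthropologie', 'senior',
--     'researcher', 'lawyer','pediatrician','mph','hr-', 'fachfrau',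
--     'physics','ecvp'
--     ]
--
-- def _valid(tok):
--     """Lowercased token if it survives the cleaning rules, else None."""
--     if '.' in tok:
--         return None
--     w = tok.lower()
--     if len(w) > 2 and w not in remove_strings:
--         return w
--     return None
--
-- def _first_valid(tokens):
--     """First surviving token of an iterable, '' if none survives (early exit)."""
--     for tok in tokens:
--         w = _valid(tok)
--         if w is not None:
--             return w
--     return ''
--
-- def parse_raw_name(raw_name):
--     # Two directed early-terminating searches instead of materializing the
--     # filtered list: first name via a forward search, last name via a search
--     # over the reversed token list.
--     cleaned = raw_name.replace(',', '').replace('(', '').replace(')', '')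
--     tokens = cleaned.split()
--     return _first_valid(tokens), _first_valid(reversed(tokens))
-- ===== Notes on version B (the rewrite author's own statement) =====
-- stated objective: alternative
-- what changed: Instead of filtering the whole token list through four passes and indexing its ends, B runs two independent early-terminating directed searches: the first surviving token scanning forward gives the first name, the first surviving token of the reversed token list gives the last name; no filtered list is ever materialized.
import Mathlib
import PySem

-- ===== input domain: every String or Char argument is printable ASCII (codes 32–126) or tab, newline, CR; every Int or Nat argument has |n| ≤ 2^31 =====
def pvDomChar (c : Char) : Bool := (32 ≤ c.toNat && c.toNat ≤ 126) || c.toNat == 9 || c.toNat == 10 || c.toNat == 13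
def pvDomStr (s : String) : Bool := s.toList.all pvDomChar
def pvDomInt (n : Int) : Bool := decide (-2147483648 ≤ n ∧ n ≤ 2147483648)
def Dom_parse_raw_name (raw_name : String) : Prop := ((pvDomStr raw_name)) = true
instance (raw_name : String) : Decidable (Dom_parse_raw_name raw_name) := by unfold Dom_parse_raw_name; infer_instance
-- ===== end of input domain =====

-- B replaces A's four sequential filter/map passes plus end-indexing by two independent
-- early-terminating directed searches (forward for the first name, over the reversed token
-- list for the last name), building no filtered list (objective: alternative).

-- ===== PORT A =====
def removeStrings : List String := [
    "dr","med", "prof", "vet",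
    "m.a", "phil", "pd", "msc",
    "phd", "em", "lic", "von",
    "mlaw", "nat", "iur", "sc",
    "dent","(†)","decvdi","advocate",
    "(verh. kaboğan)","blaw",
    "rechtsanwalt","rechtsanwältin",
    "und", "notarin","fürsprecher",
    "projektverantwortlicher", "forschungsstelle","gewalt",
    "bei", "sportveranstaltungen",  "sozialanthropologie", "senior",
    "researcher", "lawyer","pediatrician","mph","hr-", "fachfrau",
    "physics","ecvp"
    ]

def parse_raw_name (raw_name : String) : String × String :=
  let r1 := PySem.Str.replace raw_name "," ""
  let r2 := PySem.Str.replace r1 "(" ""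
  let r3 := PySem.Str.replace r2 ")" ""
  let l0 := PySem.Str.split₀ r3
  let l1 := l0.filter (fun s => !(PySem.Str.isIn "." s))
  let l2 := l1.map (fun s => PySem.Str.lower s)
  let l3 := l2.filter (fun s => decide (PySem.Str.len s > 2))
  let l4 := l3.filter (fun s => !(removeStrings.contains s))
  let first_name := if l4 ≠ [] then l4.headD "" else ""
  let last_name := if l4 ≠ [] then l4.getLastD "" else ""
  (first_name, last_name)

-- ===== PORT B =====
-- _valid(tok): lowercased token if it survives the cleaning rules, else None
def pvValid? (tok : String) : Option String :=
  if PySem.Str.isIn "." tok then none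
  else
    let w := PySem.Str.lower tok
    if PySem.Str.len w > 2 && !(removeStrings.contains w) then some w else none

-- _first_valid(tokens): first surviving token, '' if none (early exit)
def pvFirstValid : List String → String
  | [] => ""
  | t :: ts =>
    match pvValid? t with
    | some w => w
    | none => pvFirstValid ts

def parse_raw_name_alt (raw_name : String) : String × String :=
  let cleaned := PySem.Str.replace (PySem.Str.replace (PySem.Str.replace raw_name "," "") "(" "") ")" ""
  let tokens := PySem.Str.split₀ cleaned
  (pvFirstValid tokens, pvFirstValid tokens.reverse)

-- ===== PRECONDITION & SPEC =====
def Spec_parse_raw_name (raw_name : String) (out : String × String) : Prop := out = parse_raw_name_alt raw_name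
instance (raw_name : String) (out : String × String) : Decidable (Spec_parse_raw_name raw_name out) := by unfold Spec_parse_raw_name; infer_instance

-- ===== CLAIM (what is proved, stated in full; the proofs are below) =====
def Claim_equal_parse_raw_name : Prop := ∀ (raw_name : String), Dom_parse_raw_name raw_name → Spec_parse_raw_name raw_name (parse_raw_name raw_name)

-- ===== LEMMAS AND PROOFS =====

-- a directed search is the head of the filtered list
lemma pvFirstValid_eq_headD (ts : List String) :
    pvFirstValid ts = (ts.filterMap pvValid?).headD "" := by
  induction ts with
  | nil => rfl
  | cons t ts ih =>
    rw [List.filterMap_cons, pvFirstValid]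
    cases h : pvValid? t with
    | none => exact ih
    | some w => rfl

-- A's chain of filters/map computes exactly the tokens pvValid? keeps
lemma pv_chain_eq_filterMap (ts : List String) :
    ((((ts.filter (fun s => !(PySem.Str.isIn "." s))).map (fun s => PySem.Str.lower s)).filter
        (fun s => decide (PySem.Str.len s > 2))).filter (fun s => !(removeStrings.contains s)))
      = ts.filterMap pvValid? := by
  induction ts with
  | nil => rfl
  | cons t ts ih =>
    rw [List.filter_cons, List.filterMap_cons]
    by_cases h1 : PySem.Str.isIn "." t = true
    · rw [if_neg (by rw [h1]; decide)]
      rw [show pvValid? t = none by unfold pvValid?; rw [if_pos h1]]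
      exact ih
    · have h1' : PySem.Str.isIn "." t = false := Bool.eq_false_iff.mpr h1
      rw [if_pos (by rw [h1']; rfl), List.map_cons, List.filter_cons]
      by_cases h2 : decide (PySem.Str.len (PySem.Str.lower t) > 2) = true
      · rw [if_pos h2, List.filter_cons]
        by_cases h3 : removeStrings.contains (PySem.Str.lower t) = true
        · rw [if_neg (by rw [h3]; decide)]
          rw [show pvValid? t = none by
            unfold pvValid?; rw [if_neg h1]; simp only [h3, Bool.not_true, Bool.and_false]; rfl]
          exact ih
        · have h3' : removeStrings.contains (PySem.Str.lower t) = false := Bool.eq_false_iff.mpr h3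
          rw [if_pos (by rw [h3']; rfl)]
          rw [show pvValid? t = some (PySem.Str.lower t) by
            unfold pvValid?; rw [if_neg h1]
            simp only [h3', Bool.not_false, Bool.and_true, h2]; rfl]
          rw [ih]
      · have h2' : decide (PySem.Str.len (PySem.Str.lower t) > 2) = false := Bool.eq_false_iff.mpr h2
        rw [if_neg h2]
        rw [show pvValid? t = none by
          unfold pvValid?; rw [if_neg h1]; simp only [h2', Bool.false_and]; rfl]
        exact ih

lemma pv_getLastD_eq_rev (l : List String) :
    l.getLastD "" = l.reverse.headD "" := by
  rw [List.getLastD_eq_getLast?, List.headD_eq_head?, List.head?_reverse]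

-- ===== VERDICT (by name: the statement is the Claim_ definition above) =====
theorem parse_raw_name_spec : Claim_equal_parse_raw_name := by
  intro raw_name _
  show parse_raw_name raw_name = parse_raw_name_alt raw_name
  unfold parse_raw_name parse_raw_name_alt
  simp only []
  set ts := PySem.Str.split₀ (PySem.Str.replace (PySem.Str.replace
      (PySem.Str.replace raw_name "," "") "(" "") ")" "") with hts
  rw [pv_chain_eq_filterMap, pvFirstValid_eq_headD, pvFirstValid_eq_headD,
    List.filterMap_reverse, ← pv_getLastD_eq_rev]
  cases h : ts.filterMap pvValid? with
  | nil => simp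
  | cons x xs => simp
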